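-- pv_equiv track=rewrite | github.com/antonitomaszewski/Studia | II rok/II semestr/SI/Pracownia 1/Zadanie 5/heura.py | opt_dist
-- ===== SOURCE A (Python) =====
-- def opt_dist(xs, D):
--     ones = sum(xs)
--     maximum = sum(xs[0:D])
--     obecny = maximum
--     for i in range(1, len(xs)-D+1):
--         obecny += xs[i+D-1] - xs[i-1]
--         maximum = max(maximum, obecny)
--     toAdd = D - maximum
--     toRemove = ones - maximum
--     return toAdd + toRemove
-- ===== SOURCE B (Python) =====
-- def opt_dist(xs, D):
--     n = len(xs)
--     P = [0]
--     for x in xs: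
--         P.append(P[-1] + x)
--     ones = P[n]
--     windows = [P[i + D] - P[i] for i in range(n - D + 1)]
--     maximum = max(windows) if windows else ones
--     return D + ones - 2 * maximum
-- ===== Notes on version B (the rewrite author's own statement) =====
-- stated objective: alternative
-- what changed: Replaces the incremental sliding-window update (obecny += xs[i+D-1]-xs[i-1], running max) by a prefix-sum table built once, a comprehension of all window sums P[i+D]-P[i], and a single max() over it; Pre_ excludes D<0, where A always raises IndexError.
import Mathlib
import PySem

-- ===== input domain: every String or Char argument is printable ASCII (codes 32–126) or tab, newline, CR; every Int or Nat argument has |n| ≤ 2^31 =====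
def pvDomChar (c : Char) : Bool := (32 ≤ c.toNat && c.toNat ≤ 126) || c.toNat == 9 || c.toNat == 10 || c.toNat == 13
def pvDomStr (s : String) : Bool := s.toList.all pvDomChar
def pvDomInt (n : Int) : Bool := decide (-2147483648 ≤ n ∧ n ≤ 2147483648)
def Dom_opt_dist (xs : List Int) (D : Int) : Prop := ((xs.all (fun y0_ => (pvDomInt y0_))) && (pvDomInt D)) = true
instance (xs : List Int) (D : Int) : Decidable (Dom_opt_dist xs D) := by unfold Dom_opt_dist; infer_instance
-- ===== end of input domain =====

-- B replaces A's incremental sliding-window update by a prefix-sum table plus one max() over all window sums (alternative decomposition, same cost).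

-- ===== PORT A =====
def opt_dist (xs : List Int) (D : Int) : Int :=
  let ones := xs.sum
  let maximum := (PySem.List.slice xs (some 0) (some D)).sum
  let obecny := maximum
  let st := (PySem.List.pyRange 1 ((xs.length : Int) - D + 1) 1).foldl
    (fun (st : Int × Int) i =>
      let ob := st.1 + PySem.List.pyGetD xs (i + D - 1) 0 - PySem.List.pyGetD xs (i - 1) 0
      (ob, max st.2 ob)) (obecny, maximum)
  (D - st.2) + (ones - st.2)

-- ===== PORT B =====
def opt_dist_alt (xs : List Int) (D : Int) : Int :=
  let n : Int := xs.length
  let P := xs.foldl (fun acc x => acc ++ [PySem.List.pyGetD acc (-1) 0 + x]) [0]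
  let ones := PySem.List.pyGetD P n 0
  let windows := (PySem.List.pyRange 0 (n - D + 1) 1).map
    (fun i => PySem.List.pyGetD P (i + D) 0 - PySem.List.pyGetD P i 0)
  let maximum := match PySem.List.max? windows (fun y => y) with
    | some m => m
    | none => ones
  D + ones - 2 * maximum

-- ===== PRECONDITION & SPEC =====
-- Pre_ excludes D < 0, on which Python A always raises IndexError (xs[i-1] runs past the end, or xs empty).
def Pre_opt_dist (xs : List Int) (D : Int) : Prop := 0 ≤ D
instance (xs : List Int) (D : Int) : Decidable (Pre_opt_dist xs D) := by unfold Pre_opt_dist; infer_instance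
def pvWitness_opt_dist : List Int × Int := ([1, 0, 1], 2)
def Spec_opt_dist (xs : List Int) (D : Int) (out : Int) : Prop := out = opt_dist_alt xs D
instance (xs : List Int) (D : Int) (out : Int) : Decidable (Spec_opt_dist xs D out) := by unfold Spec_opt_dist; infer_instance

-- ===== CLAIM (what is proved, stated in full; the proofs are below) =====
def Claim_equal_opt_dist : Prop := ∀ (xs : List Int) (D : Int), Dom_opt_dist xs D → Pre_opt_dist xs D → Spec_opt_dist xs D (opt_dist xs D)


-- ===== LEMMAS AND PROOFS =====

-- window sum starting at j, width d, via prefix sums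
def pvW (xs : List Int) (d j : Nat) : Int := (xs.take (j + d)).sum - (xs.take j).sum

theorem pv_build_eq_scanl : ∀ (xs ys : List Int) (c : Int),
    xs.foldl (fun acc x => acc ++ [PySem.List.pyGetD acc (-1) 0 + x]) (ys ++ [c])
      = ys ++ xs.scanl (· + ·) c := by
  intro xs
  induction xs with
  | nil => intro ys c; simp [List.scanl_nil]
  | cons x t ih =>
      intro ys c
      rw [List.foldl_cons, List.scanl_cons]
      rw [PySem.List.pyGetD_neg_one_append_singleton]
      have := ih (ys ++ [c]) (c + x)
      simpa using this

theorem pv_scanl_getD : ∀ (xs : List Int) (a : Int) (k : Nat), k ≤ xs.length →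
    (xs.scanl (· + ·) a).getD k 0 = a + (xs.take k).sum := by
  intro xs
  induction xs with
  | nil =>
      intro a k hk
      have hk0 : k = 0 := by simpa using hk
      subst hk0
      simp [List.scanl_nil]
  | cons x t ih =>
      intro a k hk
      rw [List.scanl_cons]
      cases k with
      | zero => simp
      | succ k =>
          rw [List.getD_cons_succ, ih (a + x) k (by simpa using hk)]
          simp [List.take_succ_cons]
          ring

theorem pv_sum_take_succ (xs : List Int) (k : Nat) (hk : k < xs.length) :
    (xs.take (k + 1)).sum = (xs.take k).sum + xs.getD k 0 := by
  rw [List.take_add_one]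
  simp [List.getD, hk]

theorem pv_A_loop (xs : List Int) (d m : Nat) (hm : m + d ≤ xs.length) :
    (PySem.List.pyRange 1 ((m : Int) + 1) 1).foldl
      (fun (st : Int × Int) (i : Int) =>
        (st.1 + PySem.List.pyGetD xs (i + (d : Int) - 1) 0 - PySem.List.pyGetD xs (i - 1) 0,
         max st.2 (st.1 + PySem.List.pyGetD xs (i + (d : Int) - 1) 0 - PySem.List.pyGetD xs (i - 1) 0)))
      (pvW xs d 0, pvW xs d 0)
    = (pvW xs d m, ((List.range m).map (fun k => pvW xs d (k + 1))).foldl max (pvW xs d 0)) := by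
  induction m with
  | zero =>
      rw [show ((0 : Nat) : Int) + 1 = 1 by simp]
      rw [PySem.List.pyRange_one_eq_nil (le_refl 1)]
      simp
  | succ m ih =>
      have hm' : m + d ≤ xs.length := by omega
      rw [show (((m + 1 : Nat)) : Int) + 1 = ((m : Int) + 1) + 1 by omega]
      rw [PySem.List.pyRange_one_succ_right (by omega)]
      rw [List.foldl_append, ih hm', List.foldl_cons, List.foldl_nil]
      have h1 : ((m : Int) + 1) + (d : Int) - 1 = ((m + d : Nat) : Int) := by omega
      have h2 : ((m : Int) + 1) - 1 = ((m : Nat) : Int) := by omega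
      rw [h1, h2, PySem.List.pyGetD_natCast, PySem.List.pyGetD_natCast]
      have hob : pvW xs d m + xs.getD (m + d) 0 - xs.getD m 0 = pvW xs d (m + 1) := by
        unfold pvW
        have e1 : m + 1 + d = (m + d) + 1 := by omega
        rw [e1, pv_sum_take_succ xs (m + d) (by omega), pv_sum_take_succ xs m (by omega)]
        ring
      rw [hob, List.range_succ]
      simp

-- ===== VERDICT (by name: the statement is the Claim_ definition above) =====
theorem opt_dist_spec : Claim_equal_opt_dist := by
  intro xs D _hdom hpre
  unfold Spec_opt_dist
  unfold Pre_opt_dist at hpre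
  lift D to Nat using hpre with d
  have hP : xs.foldl (fun acc x => acc ++ [PySem.List.pyGetD acc (-1) 0 + x]) [0]
      = xs.scanl (· + ·) 0 := by
    have := pv_build_eq_scanl xs [] 0
    simpa using this
  have hones : PySem.List.pyGetD (xs.scanl (· + ·) 0) ((xs.length : Int)) 0 = xs.sum := by
    rw [PySem.List.pyGetD_natCast, pv_scanl_getD xs 0 xs.length (le_refl _)]
    simp
  by_cases hdn : d ≤ xs.length
  · -- at least one full window
    have hsl : (PySem.List.slice xs (some 0) (some ((d : Nat) : Int))).sum = pvW xs d 0 := by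
      rw [PySem.List.slice_zero_start, PySem.List.slice_to_natCast]
      simp [pvW]
    have hrangeA : PySem.List.pyRange 1 ((xs.length : Int) - (d : Int) + 1) 1
        = PySem.List.pyRange 1 (((xs.length - d : Nat) : Int) + 1) 1 := by
      congr 1
      omega
    have hA : opt_dist xs ((d : Nat) : Int)
        = ((d : Int) - (((List.range (xs.length - d)).map (fun k => pvW xs d (k + 1))).foldl max (pvW xs d 0)))
          + (xs.sum - (((List.range (xs.length - d)).map (fun k => pvW xs d (k + 1))).foldl max (pvW xs d 0))) := by
      simp only [opt_dist]
      rw [hsl, hrangeA, pv_A_loop xs d (xs.length - d) (by omega)]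
    have hwin : (PySem.List.pyRange 0 ((xs.length : Int) - (d : Int) + 1) 1).map
          (fun i => PySem.List.pyGetD (xs.scanl (· + ·) 0) (i + (d : Int)) 0
            - PySem.List.pyGetD (xs.scanl (· + ·) 0) i 0)
        = pvW xs d 0 :: (List.range (xs.length - d)).map (fun k => pvW xs d (k + 1)) := by
      have hb : (xs.length : Int) - (d : Int) + 1 = ((xs.length - d + 1 : Nat) : Int) := by omega
      rw [hb, PySem.List.pyRange_zero_nat]
      rw [List.map_map]
      have hmap : ∀ k ∈ List.range (xs.length - d + 1),
          ((fun i => PySem.List.pyGetD (xs.scanl (· + ·) 0) (i + (d : Int)) 0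
            - PySem.List.pyGetD (xs.scanl (· + ·) 0) i 0) ∘ (fun k : Nat => (k : Int))) k
          = pvW xs d k := by
        intro k hk
        simp only [List.mem_range] at hk
        simp only [Function.comp]
        have h1 : (k : Int) + (d : Int) = ((k + d : Nat) : Int) := by omega
        rw [h1, PySem.List.pyGetD_natCast, PySem.List.pyGetD_natCast]
        rw [pv_scanl_getD xs 0 (k + d) (by omega), pv_scanl_getD xs 0 k (by omega)]
        simp [pvW]
      rw [List.map_congr_left hmap, List.range_succ_eq_map]
      simp [List.map_map, Function.comp, Nat.succ_eq_add_one]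
    simp only [opt_dist_alt]
    rw [hP, hones, hwin, PySem.List.max?_id_cons, hA]
    ring
  · -- no full window: both loops empty, maximum = sum(xs)
    have hrangeA : PySem.List.pyRange 1 ((xs.length : Int) - (d : Int) + 1) 1 = [] := by
      apply PySem.List.pyRange_one_eq_nil
      omega
    have hrangeB : PySem.List.pyRange 0 ((xs.length : Int) - (d : Int) + 1) 1 = [] := by
      apply PySem.List.pyRange_one_eq_nil
      omega
    have hsl : (PySem.List.slice xs (some 0) (some ((d : Nat) : Int))).sum = xs.sum := by
      rw [PySem.List.slice_zero_start, PySem.List.slice_to_natCast]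
      rw [List.take_of_length_le (by omega)]
    have hnone : PySem.List.max? ([] : List Int) (fun y => y) = none := by
      simp [PySem.List.max?_eq_none_iff]
    simp only [opt_dist, opt_dist_alt]
    rw [hP, hones, hsl, hrangeA, hrangeB]
    simp only [List.map_nil, List.foldl_nil, hnone]
    ring
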